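-- pv_equiv track=rewrite | github.com/Yashraj-Vanzara/markmate. | backend/app.py | split_questions_and_answers
-- ===== SOURCE A (Python) =====
-- def split_questions_and_answers(text):
--     """Split text into individual questions/answers based on numbered format."""
--     items = []
--     current_item = []
--
--     for line in text.split('\n'):
--         line = line.strip()
--         if line:  # Skip empty lines
--             if line.startswith(('1.', '2.', '3.', '4.', '5.')) and current_item:
--                 items.append('\n'.join(current_item))
--                 current_item = [line]
--             else:
--                 current_item.append(line)
--
--     if current_item:  # Add the last item
--         items.append('\n'.join(current_item))
--
--     return items
-- ===== SOURCE B (Python) =====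
-- def _is_starter(line):
--     return line.startswith(('1.', '2.', '3.', '4.', '5.'))
--
--
-- def _split_run(ls):
--     """Return (run, rest): longest prefix of non-starter lines, and the remainder."""
--     k = 0
--     while k < len(ls) and not _is_starter(ls[k]):
--         k += 1
--     return ls[:k], ls[k:]
--
--
-- def split_questions_and_answers(text):
--     """Split text into individual questions/answers based on numbered format."""
--     lines = [s for s in map(str.strip, text.split('\n')) if s]
--     return _group(lines)
--
--
-- def _group(ls):
--     if not ls:
--         return []
--     run, rest = _split_run(ls[1:])
--     return ['\n'.join([ls[0]] + run)] + _group(rest)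
-- ===== Notes on version B (the rewrite author's own statement) =====
-- stated objective: alternative
-- what changed: Replaces the flush-on-the-fly accumulator with a two-phase strategy: first build the list of non-empty stripped lines, then recursively cut it into runs (head line plus the following non-starter lines) and join each run.
import Mathlib
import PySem

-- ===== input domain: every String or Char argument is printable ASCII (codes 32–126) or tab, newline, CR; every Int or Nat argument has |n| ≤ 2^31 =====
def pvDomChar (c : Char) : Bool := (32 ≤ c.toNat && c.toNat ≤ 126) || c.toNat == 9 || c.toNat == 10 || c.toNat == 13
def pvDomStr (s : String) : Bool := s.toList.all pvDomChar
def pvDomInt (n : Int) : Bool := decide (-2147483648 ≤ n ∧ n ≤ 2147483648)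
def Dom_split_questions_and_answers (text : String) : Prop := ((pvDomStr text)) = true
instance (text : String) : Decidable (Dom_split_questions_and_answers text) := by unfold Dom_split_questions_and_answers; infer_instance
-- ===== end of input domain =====

-- B groups the pre-filtered stripped lines by cutting at numbered starters instead of A's running accumulator; same O(n) cost, different decomposition.

-- ===== PORT A =====
def split_questions_and_answers (text : String) : List String :=
  let r := ((PySem.Str.split? text "\n").getD []).foldl
    (fun (acc : List String × List String) rawline =>
      let line := PySem.Str.strip rawline
      if line != "" then
        if (PySem.Str.startswith line "1." || PySem.Str.startswith line "2." ||
            PySem.Str.startswith line "3." || PySem.Str.startswith line "4." ||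
            PySem.Str.startswith line "5.") && !acc.2.isEmpty then
          (acc.1 ++ [PySem.Str.join "\n" acc.2], [line])
        else
          (acc.1, acc.2 ++ [line])
      else acc)
    (([], []) : List String × List String)
  if !r.2.isEmpty then r.1 ++ [PySem.Str.join "\n" r.2] else r.1

-- ===== PORT B =====
def pvIsStarter (line : String) : Bool :=
  PySem.Str.startswith line "1." || PySem.Str.startswith line "2." ||
  PySem.Str.startswith line "3." || PySem.Str.startswith line "4." ||
  PySem.Str.startswith line "5."

-- _split_run: the while loop collecting non-starter lines is List.takeWhile/dropWhile
def pvSplitRun (ls : List String) : List String × List String :=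
  (ls.takeWhile (fun l => !pvIsStarter l), ls.dropWhile (fun l => !pvIsStarter l))

def pvGroup : List String → List String
  | [] => []
  | x :: xs =>
      let p := pvSplitRun xs
      (PySem.Str.join "\n" ([x] ++ p.1)) :: pvGroup p.2
termination_by ls => ls.length
decreasing_by
  exact Nat.lt_succ_of_le (List.length_dropWhile_le _ _)

def split_questions_and_answers_alt (text : String) : List String :=
  pvGroup ((((PySem.Str.split? text "\n").getD []).map PySem.Str.strip).filter (fun s => s != ""))

-- ===== PRECONDITION & SPEC =====
def Spec_split_questions_and_answers (text : String) (out : List String) : Prop := out = split_questions_and_answers_alt text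
instance (text : String) (out : List String) : Decidable (Spec_split_questions_and_answers text out) := by unfold Spec_split_questions_and_answers; infer_instance

-- ===== CLAIM (what is proved, stated in full; the proofs are below) =====
def Claim_equal_split_questions_and_answers : Prop := ∀ (text : String), Dom_split_questions_and_answers text → Spec_split_questions_and_answers text (split_questions_and_answers text)

-- ===== LEMMAS AND PROOFS =====

-- A's loop body, on an already stripped non-empty line
def pvStepA (acc : List String × List String) (line : String) : List String × List String :=
  if pvIsStarter line && !acc.2.isEmpty then
    (acc.1 ++ [PySem.Str.join "\n" acc.2], [line])
  else
    (acc.1, acc.2 ++ [line])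

def pvFinishA (r : List String × List String) : List String :=
  if !r.2.isEmpty then r.1 ++ [PySem.Str.join "\n" r.2] else r.1

lemma split_qa_as_filtered (text : String) :
    split_questions_and_answers text =
      pvFinishA (((((PySem.Str.split? text "\n").getD []).map PySem.Str.strip).filter
        (fun s => s != "")).foldl pvStepA ([], [])) := by
  unfold split_questions_and_answers pvFinishA
  rw [PySem.List.foldl_if_eq_foldl_filter, List.filter_map, List.foldl_map]
  rfl

lemma pvGroup_nil : pvGroup [] = [] := by simp [pvGroup]

lemma pvGroup_cons (x : String) (xs : List String) :
    pvGroup (x :: xs) =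
      (PySem.Str.join "\n" ([x] ++ xs.takeWhile (fun l => !pvIsStarter l))) ::
        pvGroup (xs.dropWhile (fun l => !pvIsStarter l)) := by
  rw [pvGroup]; rfl

lemma pvMain (ls : List String) :
    ∀ (items cur : List String), cur ≠ [] →
      pvFinishA (ls.foldl pvStepA (items, cur)) =
        items ++ (PySem.Str.join "\n" (cur ++ ls.takeWhile (fun l => !pvIsStarter l))) ::
          pvGroup (ls.dropWhile (fun l => !pvIsStarter l)) := by
  induction ls with
  | nil =>
      intro items cur hcur
      simp [pvFinishA, pvGroup_nil, hcur]
  | cons l ls ih =>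
      intro items cur hcur
      by_cases hs : pvIsStarter l = true
      · have hstep : pvStepA (items, cur) l = (items ++ [PySem.Str.join "\n" cur], [l]) := by
          simp [pvStepA, hs, hcur]
        simp only [List.foldl_cons, hstep]
        rw [ih _ [l] (by simp)]
        simp [List.dropWhile_cons, hs, pvGroup_cons]
      · have hq : (fun l => !pvIsStarter l) l = true := by simp [hs]
        have hstep : pvStepA (items, cur) l = (items, cur ++ [l]) := by
          simp [pvStepA, hs]
        simp only [List.foldl_cons, hstep]
        rw [ih _ (cur ++ [l]) (by simp)]
        simp [List.dropWhile_cons, hs]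

lemma pvEquiv (text : String) :
    split_questions_and_answers text = split_questions_and_answers_alt text := by
  rw [split_qa_as_filtered]
  unfold split_questions_and_answers_alt
  set L := (((PySem.Str.split? text "\n").getD []).map PySem.Str.strip).filter (fun s => s != "") with hL
  cases L with
  | nil => simp [pvFinishA, pvGroup_nil]
  | cons x xs =>
      have hstep : pvStepA ([], []) x = ([], [x]) := by
        simp [pvStepA]
      simp only [List.foldl_cons, hstep]
      rw [pvMain xs [] [x] (by simp), pvGroup_cons]
      simp

-- ===== VERDICT (by name: the statement is the Claim_ definition above) =====
theorem split_questions_and_answers_spec : Claim_equal_split_questions_and_answers := by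
  intro text _
  exact pvEquiv text
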